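-- pv_equiv track=rewrite | github.com/wyf162/pythonProject | atcoder/archieve/arc_166/a.py | check
-- ===== SOURCE A (Python) =====
-- def check(xaidxs, xcidxs, yaidxs):
--     ai, ci = 0, 0
--     cd = len(yaidxs) - len(xaidxs)
--     if cd < 0 or cd > len(xcidxs):
--         return False
--     xaidxs = xaidxs + xcidxs[:cd]
--     xaidxs.sort()
--     for j in range(len(yaidxs)):
--         if xaidxs[j] > yaidxs[j]:
--             return False
--     return True
-- ===== SOURCE B (Python) =====
-- def check(xaidxs, xcidxs, yaidxs):
--     need, got = len(yaidxs), len(xaidxs)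
--     if got > need or got + len(xcidxs) < need:
--         return False
--     extra = xcidxs[:need - got]
--     j = 0
--     for t in yaidxs:
--         # the j-th smallest of the candidate pool is <= t iff more than j
--         # pool elements are <= t; count the two parts separately, no sort
--         if sum(v <= t for v in xaidxs) + sum(v <= t for v in extra) <= j:
--             return False
--         j += 1
--     return True
-- ===== Notes on version B (the rewrite author's own statement) =====
-- stated objective: alternative
-- what changed: B never builds or sorts a merged pool: it uses the order-statistic characterisation (the j-th smallest candidate is <= yaidxs[j] iff more than j candidates are <= yaidxs[j]) and checks it position by position with two direct counts over xaidxs and the xcidxs prefix.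
import Mathlib
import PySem

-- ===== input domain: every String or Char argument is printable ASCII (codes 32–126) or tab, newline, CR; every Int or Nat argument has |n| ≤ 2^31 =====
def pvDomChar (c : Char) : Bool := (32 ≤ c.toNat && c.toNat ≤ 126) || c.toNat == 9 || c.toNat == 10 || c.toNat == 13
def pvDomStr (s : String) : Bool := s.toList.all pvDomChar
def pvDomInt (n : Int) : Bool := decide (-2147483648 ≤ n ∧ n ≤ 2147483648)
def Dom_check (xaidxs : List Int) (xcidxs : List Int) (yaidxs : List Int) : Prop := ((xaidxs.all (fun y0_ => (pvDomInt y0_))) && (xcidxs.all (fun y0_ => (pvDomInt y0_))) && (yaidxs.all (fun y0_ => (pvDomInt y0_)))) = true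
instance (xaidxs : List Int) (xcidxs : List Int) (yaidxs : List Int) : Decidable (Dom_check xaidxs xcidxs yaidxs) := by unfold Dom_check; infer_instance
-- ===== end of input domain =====

-- B replaces A's sort-then-compare by a positional order-statistic counting test (the j-th smallest
-- candidate is ≤ yaidxs[j] iff more than j candidates are ≤ yaidxs[j]) with no merged pool and no
-- sort; objective: alternative.

-- ===== PORT A =====
def check (xaidxs : List Int) (xcidxs : List Int) (yaidxs : List Int) : Bool :=
  let cd : Int := (yaidxs.length : Int) - (xaidxs.length : Int)
  if cd < 0 ∨ cd > (xcidxs.length : Int) then false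
  else
    -- xaidxs = xaidxs + xcidxs[:cd]; xaidxs.sort()
    let m := PySem.List.sorted (xaidxs ++ PySem.List.slice xcidxs none (some cd)) (fun x => x) false
    -- for j in range(len(yaidxs)): if xaidxs[j] > yaidxs[j]: return False
    (PySem.List.pyRange 0 (yaidxs.length : Int) 1).foldl
      (fun ok j => if PySem.List.pyGetD m j 0 > PySem.List.pyGetD yaidxs j 0 then false else ok) true

-- ===== PORT B =====
-- the 'for t in yaidxs:' loop of Source B with its running index j, as structural recursion
def checkAltGo (xaidxs : List Int) (extra : List Int) : List Int → Nat → Bool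
  | [], _ => true
  | t :: ts, j =>
    if xaidxs.countP (fun v => decide (v ≤ t)) + extra.countP (fun v => decide (v ≤ t)) ≤ j
    then false
    else checkAltGo xaidxs extra ts (j + 1)

def check_alt (xaidxs : List Int) (xcidxs : List Int) (yaidxs : List Int) : Bool :=
  let need := yaidxs.length
  let got := xaidxs.length
  if got > need ∨ got + xcidxs.length < need then false
  else checkAltGo xaidxs (xcidxs.take (need - got)) yaidxs 0

-- ===== PRECONDITION & SPEC =====
def Spec_check (xaidxs : List Int) (xcidxs : List Int) (yaidxs : List Int) (out : Bool) : Prop := out = check_alt xaidxs xcidxs yaidxs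
instance (xaidxs : List Int) (xcidxs : List Int) (yaidxs : List Int) (out : Bool) : Decidable (Spec_check xaidxs xcidxs yaidxs out) := by unfold Spec_check; infer_instance

-- ===== CLAIM (what is proved, stated in full; the proofs are below) =====
def Claim_equal_check : Prop := ∀ (xaidxs : List Int) (xcidxs : List Int) (yaidxs : List Int), Dom_check xaidxs xcidxs yaidxs → Spec_check xaidxs xcidxs yaidxs (check xaidxs xcidxs yaidxs)

-- ===== LEMMAS AND PROOFS =====

-- proof-only abbreviation for the candidate count B computes at a target t
def pvCnt (xa extra : List Int) (t : Int) : Nat :=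
  xa.countP (fun v => decide (v ≤ t)) + extra.countP (fun v => decide (v ≤ t))

-- order statistic vs count: the j-th smallest element of pool is ≤ t iff at least j+1 elements of pool are ≤ t
lemma nth_sorted_le_iff (pool : List Int) (j : Nat) (t : Int)
    (hj : j < (PySem.List.sorted pool (fun x => x) false).length) :
    ((PySem.List.sorted pool (fun x => x) false)[j] ≤ t ↔
      j + 1 ≤ pool.countP (fun v => decide (v ≤ t))) := by
  have hperm := PySem.List.sorted_perm pool (fun x => x) false
  rw [← hperm.countP_eq]
  have hmono : ∀ (p q : Nat) (hpq : p ≤ q), ∀ hq : q < (PySem.List.sorted pool (fun x => x) false).length,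
      (PySem.List.sorted pool (fun x => x) false)[p]'(Nat.lt_of_le_of_lt hpq hq) ≤
        (PySem.List.sorted pool (fun x => x) false)[q] := by
    intro p q hpq hq
    exact PySem.List.sorted_id_getElem_mono pool hpq hq
  generalize hS : PySem.List.sorted pool (fun x => x) false = s at *
  constructor
  · intro h
    have hlen : (s.take (j + 1)).length = j + 1 := by simp; omega
    have hall : ∀ a ∈ s.take (j + 1), (fun v => decide (v ≤ t)) a = true := by
      intro a ha
      rcases List.mem_iff_getElem.mp ha with ⟨i, hi, rfl⟩
      have hij : i ≤ j := by omega
      rw [List.getElem_take]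
      simp only [decide_eq_true_eq]
      exact le_trans (hmono i j hij hj) h
    have h1 : (s.take (j + 1)).countP (fun v => decide (v ≤ t)) = j + 1 :=
      (List.countP_eq_length.mpr hall).trans hlen
    have h2 : s.countP (fun v => decide (v ≤ t)) =
        (s.take (j + 1)).countP (fun v => decide (v ≤ t)) +
        (s.drop (j + 1)).countP (fun v => decide (v ≤ t)) := by
      conv_lhs => rw [← List.take_append_drop (j + 1) s]
      rw [List.countP_append]
    omega
  · intro h
    by_contra hcon
    push Not at hcon
    have hdrop : (s.drop j).countP (fun v => decide (v ≤ t)) = 0 := by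
      rw [List.countP_eq_zero]
      intro a ha
      rcases List.mem_iff_getElem.mp ha with ⟨i, hi, rfl⟩
      have hji : j + i < s.length := by
        have := s.length_drop (i := j); omega
      rw [List.getElem_drop]
      have hmono' := hmono j (j + i) (by omega) hji
      simp only [decide_eq_true_eq]
      omega
    have h2 : s.countP (fun v => decide (v ≤ t)) =
        (s.take j).countP (fun v => decide (v ≤ t)) +
        (s.drop j).countP (fun v => decide (v ≤ t)) := by
      conv_lhs => rw [← List.take_append_drop j s]
      rw [List.countP_append]
    have h3 : (s.take j).countP (fun v => decide (v ≤ t)) ≤ (s.take j).length :=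
      List.countP_le_length
    have h4 : (s.take j).length ≤ j := by simp
    omega

-- B's loop succeeds iff each position k has strictly more than j+k candidates ≤ ts[k]
lemma checkAltGo_eq_true_iff (xa extra : List Int) (ts : List Int) (j : Nat) :
    checkAltGo xa extra ts j = true ↔
      ∀ k (hk : k < ts.length), j + k < pvCnt xa extra ts[k] := by
  induction ts generalizing j with
  | nil => simp [checkAltGo]
  | cons t ts ih =>
    show (if pvCnt xa extra t ≤ j then false else checkAltGo xa extra ts (j + 1)) = true ↔ _
    by_cases h : pvCnt xa extra t ≤ j
    · simp only [if_pos h]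
      constructor
      · intro hfalse; cases hfalse
      · intro hall
        have := hall 0 (by simp)
        simp only [List.getElem_cons_zero] at this
        omega
    · simp only [if_neg h, ih]
      push Not at h
      constructor
      · intro hall k hk
        match k, hk with
        | 0, _ => simp only [List.getElem_cons_zero]; omega
        | (k+1), hk =>
          have hk' : k < ts.length := by simpa using hk
          have := hall k hk'
          simp only [List.getElem_cons_succ]
          omega
      · intro hall k hk
        have := hall (k + 1) (by simpa using Nat.succ_lt_succ hk)
        simp only [List.getElem_cons_succ] at this
        omega

-- ===== VERDICT (by name: the statement is the Claim_ definition above) =====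
theorem check_spec : Claim_equal_check := by
  intro xaidxs xcidxs yaidxs _
  unfold Spec_check check check_alt
  by_cases hg : ((yaidxs.length : Int) - (xaidxs.length : Int) < 0 ∨
      (yaidxs.length : Int) - (xaidxs.length : Int) > (xcidxs.length : Int))
  · rw [if_pos hg]
    rw [if_pos (by omega : xaidxs.length > yaidxs.length ∨ xaidxs.length + xcidxs.length < yaidxs.length)]
  · have hg' : ¬ (xaidxs.length > yaidxs.length ∨ xaidxs.length + xcidxs.length < yaidxs.length) := by omega
    simp only [if_neg hg, if_neg hg']
    push Not at hg
    obtain ⟨h0, hc⟩ := hg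
    set cd : Int := (yaidxs.length : Int) - (xaidxs.length : Int) with hcd
    have hextra : PySem.List.slice xcidxs none (some cd) = xcidxs.take (yaidxs.length - xaidxs.length) := by
      rw [PySem.List.slice_to xcidxs h0]
      congr 1
      omega
    set extra := xcidxs.take (yaidxs.length - xaidxs.length) with hex
    set pool := xaidxs ++ PySem.List.slice xcidxs none (some cd) with hpool
    have hpl : pool.length = yaidxs.length := by
      rw [hpool, hextra]
      simp only [List.length_append, hex, List.length_take]
      omega
    have hsl : (PySem.List.sorted pool (fun x => x) false).length = yaidxs.length := by
      rw [PySem.List.length_sorted, hpl]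
    have hcount : ∀ t : Int, pool.countP (fun v => decide (v ≤ t)) = pvCnt xaidxs extra t := by
      intro t; rw [hpool, hextra, pvCnt, List.countP_append]
    have hdec : (fun (ok : Bool) (j : Int) =>
        if PySem.List.pyGetD (PySem.List.sorted pool (fun x => x) false) j 0 >
            PySem.List.pyGetD yaidxs j 0 then false else ok)
      = (fun (ok : Bool) (j : Int) =>
          if (fun (j : Int) => decide (PySem.List.pyGetD (PySem.List.sorted pool (fun x => x) false) j 0 >
            PySem.List.pyGetD yaidxs j 0)) j = true then false else ok) := by
      funext ok j; simp
    rw [hdec, PySem.List.foldl_if_false_eq]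
    simp only [Bool.true_and]
    rw [Bool.eq_iff_iff, checkAltGo_eq_true_iff]
    simp only [Bool.not_eq_true', List.any_eq_false]
    constructor
    · intro hA k hk
      have hk' : ((k : Int)) ∈ PySem.List.pyRange 0 (yaidxs.length : Int) 1 := by
        rw [PySem.List.mem_pyRange_one]
        exact ⟨by omega, by exact_mod_cast hk⟩
      have hle := hA _ hk'
      simp only [decide_eq_true_eq, gt_iff_lt, not_lt, PySem.List.pyGetD_natCast] at hle
      rw [List.getD_eq_getElem _ _ (by omega : k < (PySem.List.sorted pool (fun x => x) false).length),
        List.getD_eq_getElem _ _ hk] at hle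
      have hcnt := (nth_sorted_le_iff pool k yaidxs[k] (by omega)).mp hle
      rw [hcount yaidxs[k]] at hcnt
      omega
    · intro hB j hj
      rw [PySem.List.mem_pyRange_one] at hj
      obtain ⟨hj0, hjn⟩ := hj
      have hk : j.toNat < yaidxs.length := by omega
      have hcnt := hB j.toNat hk
      rw [← hcount yaidxs[j.toNat]] at hcnt
      have hle := (nth_sorted_le_iff pool j.toNat yaidxs[j.toNat] (by omega)).mpr (by omega)
      have hjk : j = (j.toNat : Int) := by omega
      rw [hjk]
      simp only [decide_eq_true_eq, gt_iff_lt, not_lt, PySem.List.pyGetD_natCast]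
      rw [List.getD_eq_getElem _ _ (by omega : j.toNat < (PySem.List.sorted pool (fun x => x) false).length),
        List.getD_eq_getElem _ _ hk]
      exact hle
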